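-- pv_equiv track=rewrite | github.com/ekeilty17/Personal-Projects-In-Python | Math/Linear Algebra/Old/GE_old.py | isZerosBelow
-- ===== SOURCE A (Python) =====
-- def isZerosBelow(A):
--     #checking that any row with all zeros is at the bottom
--     zeros = []
--     for i in range(0,len(A[0])-1):
--         zeros += [0]
--     foundZero = False
--     for row in A:
--         #row[:-1] excludes the last element in the row
--         if row[:-1] == zeros:
--             foundZero = True
--         #this looks a little weird, but it works
--         #this is for later rows, if a zero row was found
--         #and then a nonzero row was found, it returns false
--         if foundZero == True:
--             if row[:-1] != zeros:
--                 return False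
--     return True
-- ===== SOURCE B (Python) =====
-- def isZerosBelow(A):
--     # Table-then-monotonicity: mark which rows are all-zero (excluding last column),
--     # then the zero rows form a bottom suffix iff the flag list is non-decreasing.
--     width = len(A[0]) - 1
--     z = [row[:-1] == [0] * width for row in A]
--     return z == sorted(z)
-- ===== Notes on version B (the rewrite author's own statement) =====
-- stated objective: simpler
-- what changed: Replaces the interleaved foundZero-flag loop with early return by a two-step decomposition: build a boolean table of zero-rows, then check it is non-decreasing via z == sorted(z).
import Mathlib
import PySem

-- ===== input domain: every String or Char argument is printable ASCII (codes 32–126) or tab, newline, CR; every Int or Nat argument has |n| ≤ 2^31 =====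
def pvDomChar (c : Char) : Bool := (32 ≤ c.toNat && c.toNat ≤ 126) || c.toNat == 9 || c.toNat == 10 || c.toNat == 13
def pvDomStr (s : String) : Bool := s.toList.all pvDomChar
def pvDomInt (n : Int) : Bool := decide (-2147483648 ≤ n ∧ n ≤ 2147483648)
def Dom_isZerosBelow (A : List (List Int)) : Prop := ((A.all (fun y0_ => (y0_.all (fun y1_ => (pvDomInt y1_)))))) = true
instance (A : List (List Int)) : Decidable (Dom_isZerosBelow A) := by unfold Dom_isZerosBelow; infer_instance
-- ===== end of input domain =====

-- B replaces A's interleaved foundZero-flag loop with a table-then-monotonicity decomposition (objective: simpler).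

-- ===== PORT A =====
-- the 'for row in A' loop with the foundZero flag and the early 'return False'
def pvALoop (zeros : List Int) (rows : List (List Int)) (foundZero : Bool) : Bool :=
  match rows with
  | [] => true
  | row :: rest =>
    let foundZero := if PySem.List.slice row none (some (-1)) == zeros then true else foundZero
    if foundZero = true then
      if PySem.List.slice row none (some (-1)) != zeros then false
      else pvALoop zeros rest foundZero
    else pvALoop zeros rest foundZero

def isZerosBelow (A : List (List Int)) : Bool :=
  match PySem.List.pyGet? A 0 with
  | none => false   -- A[0] raises IndexError: excluded by Pre_
  | some r0 =>
    -- zeros = []; for i in range(0, len(A[0])-1): zeros += [0]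
    let zeros := (PySem.List.pyRange 0 ((r0.length : Int) - 1) 1).foldl
                   (fun acc _ => acc ++ [(0 : Int)]) []
    pvALoop zeros A false

-- ===== PORT B =====
def isZerosBelow_alt (A : List (List Int)) : Bool :=
  match PySem.List.pyGet? A 0 with
  | none => false   -- A[0] raises IndexError: excluded by Pre_
  | some r0 =>
    let width := (r0.length : Int) - 1
    -- [0] * width; Int.toNat clamps negatives to 0 exactly like Python's list repetition
    let z := A.map (fun row =>
      PySem.List.slice row none (some (-1)) == List.replicate width.toNat (0 : Int))
    z == PySem.List.sorted z (fun b => b) false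

-- ===== PRECONDITION & SPEC =====
-- A raises IndexError on the empty matrix (A[0]); excluded.
def Pre_isZerosBelow (A : List (List Int)) : Prop := A ≠ []
instance (A : List (List Int)) : Decidable (Pre_isZerosBelow A) := by unfold Pre_isZerosBelow; infer_instance
def pvWitness_isZerosBelow : List (List Int) := [[1, 2], [0, 3]]

def Spec_isZerosBelow (A : List (List Int)) (out : Bool) : Prop := out = isZerosBelow_alt A
instance (A : List (List Int)) (out : Bool) : Decidable (Spec_isZerosBelow A out) := by unfold Spec_isZerosBelow; infer_instance

-- ===== CLAIM (what is proved, stated in full; the proofs are below) =====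
def Claim_equal_isZerosBelow : Prop := ∀ (A : List (List Int)), Dom_isZerosBelow A → Pre_isZerosBelow A → Spec_isZerosBelow A (isZerosBelow A)

-- ===== LEMMAS AND PROOFS =====

-- the zeros-building loop of A produces a replicate
theorem pv_zeros_eq_replicate {α : Type} (l : List α) (acc : List Int) :
    l.foldl (fun acc _ => acc ++ [(0 : Int)]) acc = acc ++ List.replicate l.length 0 := by
  induction l generalizing acc with
  | nil => simp
  | cons x xs ih =>
    simp only [List.foldl, ih, List.length_cons]
    rw [List.append_assoc]
    rfl

-- mirror of A's loop on the boolean table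
def pvMono (found : Bool) (z : List Bool) : Bool :=
  match z with
  | [] => true
  | b :: rest =>
    let f := if b then true else found
    if f then (if !b then false else pvMono f rest) else pvMono f rest

theorem pv_aLoop_eq_mono (zeros : List Int) (rows : List (List Int)) (found : Bool) :
    pvALoop zeros rows found
      = pvMono found (rows.map (fun row => PySem.List.slice row none (some (-1)) == zeros)) := by
  induction rows generalizing found with
  | nil => rfl
  | cons row rest ih =>
    simp only [pvALoop, pvMono, List.map]
    by_cases h : PySem.List.slice row none (some (-1)) = zeros <;>
      cases found <;> simp [h, ih]

theorem pv_mono_true (z : List Bool) : pvMono true z = z.all id := by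
  induction z with
  | nil => rfl
  | cons b rest ih => cases b <;> simp [pvMono, ih]

theorem pv_all_pairwise (z : List Bool) (h : z.all id = true) : z.Pairwise (· ≤ ·) := by
  induction z with
  | nil => exact List.Pairwise.nil
  | cons b rest ih =>
    simp only [List.all_cons, Bool.and_eq_true, id] at h
    refine List.Pairwise.cons (fun x hx => ?_) (ih h.2)
    have hx' : x = true := by simpa using List.all_eq_true.mp h.2 x hx
    simp [hx']

theorem pv_mono_false_iff (z : List Bool) : pvMono false z = true ↔ z.Pairwise (· ≤ ·) := by
  induction z with
  | nil => simp [pvMono]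
  | cons b rest ih =>
    cases b with
    | false =>
      simpa [pvMono, List.pairwise_cons, Bool.false_le] using ih
    | true =>
      rw [show pvMono false (true :: rest) = pvMono true rest from by simp [pvMono],
        pv_mono_true]
      simp only [List.pairwise_cons]
      constructor
      · intro h
        refine ⟨fun x hx => ?_, pv_all_pairwise rest h⟩
        have hx' : x = true := by simpa using List.all_eq_true.mp h x hx
        simp [hx']
      · rintro ⟨h1, _⟩
        refine List.all_eq_true.mpr fun x hx => ?_
        have := h1 x hx
        cases x
        · exact absurd this (by decide)
        · rfl

theorem pv_mono_eq_sorted (z : List Bool) :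
    pvMono false z = (z == PySem.List.sorted z (fun b => b) false) := by
  by_cases hp : z.Pairwise (· ≤ ·)
  · have h2 : PySem.List.sorted z (fun b => b) false = z :=
      PySem.List.sorted_eq_self_of_pairwise z (fun b => b) hp
    rw [(pv_mono_false_iff z).mpr hp, h2, beq_self_eq_true]
  · have hs : z ≠ PySem.List.sorted z (fun b => b) false := by
      intro he
      exact hp (he ▸ PySem.List.sorted_pairwise z (fun b => b))
    exact Eq.symm <| by
      rw [Bool.eq_false_iff.mpr fun h => hp ((pv_mono_false_iff z).mp h),
        beq_eq_false_iff_ne.mpr hs]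

-- ===== VERDICT (by name: the statement is the Claim_ definition above) =====
theorem isZerosBelow_spec : Claim_equal_isZerosBelow := by
  intro A _ hP
  unfold Spec_isZerosBelow
  cases A with
  | nil => exact absurd rfl hP
  | cons r0 rest =>
    show isZerosBelow (r0 :: rest) = isZerosBelow_alt (r0 :: rest)
    simp only [isZerosBelow, isZerosBelow_alt, PySem.List.pyGet?_zero_cons]
    rw [pv_zeros_eq_replicate, pv_aLoop_eq_mono, pv_mono_eq_sorted]
    simp [PySem.List.length_pyRange_one]
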